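-- pv_equiv track=rewrite | github.com/1712844/CI | python/DP/powerSet.py | convertIntToSet
-- ===== SOURCE A (Python) =====
-- def convertIntToSet(x, set):
--     index = 0
--     subset = []
--     k = x
--     while(k > 0):
--         if k & 1:
--             subset.append(set[index])
--         index += 1
--         k >>= 1
--     return subset
-- ===== SOURCE B (Python) =====
-- def convertIntToSet(x, set):
--     # Recursive decomposition: peel off bit 0 of x against the head of the
--     # list, then recurse on the remaining bits against the tail.
--     if x <= 0:
--         return []
--     head = [set[0]] if x & 1 else []
--     return head + convertIntToSet(x >> 1, set[1:])
-- ===== Notes on version B (the rewrite author's own statement) =====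
-- stated objective: alternative
-- what changed: Replaces the while-loop that mutates k and an index counter by structural recursion: peel bit 0 against the list head and recurse on x>>1 with the tail slice (no index, no mutation).
import Mathlib
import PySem

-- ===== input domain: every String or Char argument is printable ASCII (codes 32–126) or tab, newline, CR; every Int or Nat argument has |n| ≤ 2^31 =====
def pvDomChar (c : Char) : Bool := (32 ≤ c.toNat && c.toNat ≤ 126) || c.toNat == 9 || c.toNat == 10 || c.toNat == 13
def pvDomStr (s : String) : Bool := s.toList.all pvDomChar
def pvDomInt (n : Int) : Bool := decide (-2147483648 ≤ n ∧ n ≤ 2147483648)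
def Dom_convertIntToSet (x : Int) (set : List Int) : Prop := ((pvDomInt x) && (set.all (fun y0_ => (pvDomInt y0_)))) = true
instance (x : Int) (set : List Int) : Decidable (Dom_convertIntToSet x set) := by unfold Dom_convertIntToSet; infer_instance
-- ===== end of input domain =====

-- B replaces A's index-counting while loop by structural recursion (bit 0 against the head, x>>1 against the tail); alternative decomposition, same cost.

-- ===== PORT A =====
-- the while loop of A; k & 1 = k % 2 and k >> 1 = k // 2 (Python-exact for every k);
-- pyGetD's default 0 is never reached inside Pre_ (out-of-range set[index] is A's IndexError, excluded by Pre_)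
def convertIntToSetLoop (set : List Int) (k : Int) (index : Nat) (subset : List Int) : List Int :=
  if 0 < k then
    convertIntToSetLoop set (PySem.Int.floordiv k 2) (index + 1)
      (if PySem.Int.mod k 2 = 1 then subset ++ [PySem.List.pyGetD set (index : Int) 0] else subset)
  else subset
termination_by k.toNat
decreasing_by
  rename_i h
  rw [PySem.Int.floordiv_eq_ediv_of_pos (by omega)]
  omega

def convertIntToSet (x : Int) (set : List Int) : List Int :=
  convertIntToSetLoop set x 0 []

-- ===== PORT B =====
-- literal transliteration of Source B: x & 1 = x % 2, x >> 1 = x // 2, set[1:] = slice 1 none;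
-- pyGetD's default 0 is never reached inside Pre_ (set[0] on empty list is the IndexError, excluded by Pre_)
def convertIntToSet_alt (x : Int) (set : List Int) : List Int :=
  if x ≤ 0 then []
  else
    (if PySem.Int.mod x 2 = 1 then [PySem.List.pyGetD set 0 0] else [])
      ++ convertIntToSet_alt (PySem.Int.floordiv x 2) (PySem.List.slice set (some 1) none)
termination_by x.toNat
decreasing_by
  rename_i h
  rw [PySem.Int.floordiv_eq_ediv_of_pos (by omega)]
  omega

-- ===== PRECONDITION & SPEC =====
-- Pre_ excludes exactly the inputs where both programs raise IndexError: 0 < x with a set bit at position ≥ len(set)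
def Pre_convertIntToSet (x : Int) (set : List Int) : Prop := x < 2 ^ set.length
instance (x : Int) (set : List Int) : Decidable (Pre_convertIntToSet x set) := by unfold Pre_convertIntToSet; infer_instance
def pvWitness_convertIntToSet : Int × List Int := (5, [10, 20, 30])

def Spec_convertIntToSet (x : Int) (set : List Int) (out : List Int) : Prop := out = convertIntToSet_alt x set
instance (x : Int) (set : List Int) (out : List Int) : Decidable (Spec_convertIntToSet x set out) := by unfold Spec_convertIntToSet; infer_instance

-- ===== CLAIM (what is proved, stated in full; the proofs are below) =====
def Claim_equal_convertIntToSet : Prop := ∀ (x : Int) (set : List Int), Dom_convertIntToSet x set → Pre_convertIntToSet x set → Spec_convertIntToSet x set (convertIntToSet x set)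

-- ===== LEMMAS AND PROOFS =====

-- reference selection: keep each element whose bit of n is set, consuming one bit per element
def selSpec (n : Nat) : List Int → List Int
  | [] => []
  | a :: l => (if n % 2 = 1 then [a] else []) ++ selSpec (n / 2) l

theorem selSpec_zero (l : List Int) : selSpec 0 l = [] := by
  induction l with
  | nil => rfl
  | cons a l ih => simp [selSpec, ih]

theorem loopA_eq_selSpec (n : Nat) : ∀ (set : List Int) (idx : Nat) (acc : List Int),
    n < 2 ^ (set.length - idx) →
    convertIntToSetLoop set (n : Int) idx acc = acc ++ selSpec n (set.drop idx) := by
  induction n using Nat.strong_induction_on with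
  | _ n ih =>
    intro set idx acc hlt
    by_cases hn : 0 < n
    · have hidx : idx < set.length := by
        by_contra h
        have : set.length - idx = 0 := by omega
        rw [this] at hlt; simp at hlt; omega
      rw [convertIntToSetLoop]
      have hk : (0 : Int) < (n : Int) := by exact_mod_cast hn
      rw [if_pos hk]
      have hfd : PySem.Int.floordiv (n : Int) 2 = ((n / 2 : Nat) : Int) := by
        exact_mod_cast PySem.Int.floordiv_natCast n 2
      have hmd : PySem.Int.mod (n : Int) 2 = ((n % 2 : Nat) : Int) := by
        exact_mod_cast PySem.Int.mod_natCast n 2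
      have hget : PySem.List.pyGetD set (idx : Int) 0 = set[idx] :=
        PySem.List.pyGetD_ofNat set idx 0 hidx
      have hdrop : set.drop idx = set[idx] :: set.drop (idx + 1) :=
        (List.drop_eq_getElem_cons hidx)
      have hrec : n / 2 < 2 ^ (set.length - (idx + 1)) := by
        have h2 : 2 ^ (set.length - idx) = 2 * 2 ^ (set.length - (idx + 1)) := by
          rw [← pow_succ']
          congr 1
          omega
        omega
      rw [hfd, ih (n / 2) (by omega) set (idx + 1) _ hrec, hmd, hget, hdrop]
      by_cases hm : n % 2 = 1
      · rw [if_pos (by exact_mod_cast hm), selSpec, if_pos hm]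
        simp
      · rw [if_neg (by omega), selSpec, if_neg hm]
        simp
    · have hn0 : n = 0 := by omega
      subst hn0
      rw [convertIntToSetLoop, if_neg (by omega), selSpec_zero]
      simp

theorem alt_eq_selSpec (n : Nat) : ∀ (set : List Int),
    n < 2 ^ set.length →
    convertIntToSet_alt (n : Int) set = selSpec n set := by
  induction n using Nat.strong_induction_on with
  | _ n ih =>
    intro set hlt
    by_cases hn : 0 < n
    · have hlen : 0 < set.length := by
        by_contra h
        have : set.length = 0 := by omega
        rw [this] at hlt; simp at hlt; omega
      obtain ⟨a, l, rfl⟩ : ∃ a l, set = a :: l := by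
        cases set with
        | nil => simp at hlen
        | cons a l => exact ⟨a, l, rfl⟩
      rw [convertIntToSet_alt]
      have hk : ¬ ((n : Int) ≤ 0) := by
        push Not; exact_mod_cast hn
      rw [if_neg hk]
      have hfd : PySem.Int.floordiv (n : Int) 2 = ((n / 2 : Nat) : Int) := by
        exact_mod_cast PySem.Int.floordiv_natCast n 2
      have hmd : PySem.Int.mod (n : Int) 2 = ((n % 2 : Nat) : Int) := by
        exact_mod_cast PySem.Int.mod_natCast n 2
      have hsl : PySem.List.slice (a :: l) (some 1) none = l := by
        have := PySem.List.slice_from_natCast (a :: l) 1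
        simpa using this
      have hrec : n / 2 < 2 ^ l.length := by
        have h2 : 2 ^ (a :: l).length = 2 * 2 ^ l.length := by
          simp [List.length_cons, pow_succ]
          ring
        rw [h2] at hlt
        omega
      rw [hfd, hmd, hsl, ih (n / 2) (by omega) l hrec]
      have hget : PySem.List.pyGetD (a :: l) 0 0 = a := by
        simp [PySem.List.pyGetD, PySem.List.pyGet?, PySem.List.pyIdx?]
      by_cases hm : n % 2 = 1
      · rw [if_pos (by exact_mod_cast hm), hget, selSpec, if_pos hm]
      · rw [if_neg (by omega), selSpec, if_neg hm]
    · have hn0 : n = 0 := by omega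
      subst hn0
      rw [convertIntToSet_alt, if_pos (by simp)]
      exact (selSpec_zero set).symm

-- ===== VERDICT (by name: the statement is the Claim_ definition above) =====
theorem convertIntToSet_spec : Claim_equal_convertIntToSet := by
  intro x set _ hpre
  unfold Spec_convertIntToSet convertIntToSet
  by_cases hx : 0 < x
  · have hx' : x = ((x.toNat : Nat) : Int) := by omega
    have hlt : x.toNat < 2 ^ set.length := by
      have hc : (2 : Int) ^ set.length = ((2 ^ set.length : Nat) : Int) := by push_cast; ring
      unfold Pre_convertIntToSet at hpre
      rw [hc] at hpre
      omega
    rw [hx', loopA_eq_selSpec x.toNat set 0 [] (by simpa using hlt),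
        alt_eq_selSpec x.toNat set hlt]
    simp
  · rw [convertIntToSetLoop, if_neg hx, convertIntToSet_alt, if_pos (by omega)]
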